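-- pv_equiv track=rewrite | github.com/scarpel/strassenAlgorithm | strassen.py | get_final_parts
-- ===== SOURCE A (Python) =====
-- def get_final_parts(parts, size):
--     lines = columns = size
--     finalParts = [[],[],[],[]]
--
--     for line in range(lines):
--         sum1 = []
--         sum2 = []
--         sum3 = []
--         sum4 = []
--
--         for column in range(columns):
--             sum1.append(parts[4][line][column]+parts[3][line][column]-parts[1][line][column]+parts[5][line][column])
--             sum2.append(parts[0][line][column]+parts[1][line][column])
--             sum3.append(parts[2][line][column]+parts[3][line][column])
--             sum4.append(parts[0][line][column]+parts[4][line][column]-parts[2][line][column]-parts[6][line][column])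
--
--         finalParts[0].append(sum1)
--         finalParts[1].append(sum2)
--         finalParts[2].append(sum3)
--         finalParts[3].append(sum4)
--
--     return finalParts
-- ===== SOURCE B (Python) =====
-- def get_final_parts(parts, size):
--     def madd(X, Y):
--         return [[a + b for a, b in zip(rx, ry)] for rx, ry in zip(X, Y)]
--
--     def msub(X, Y):
--         return [[a - b for a, b in zip(rx, ry)] for rx, ry in zip(X, Y)]
--
--     def part(k):
--         return [parts[k][i][:size] for i in range(size)]
--
--     p0, p1, p2, p3, p4, p5, p6 = (part(k) for k in range(7))
--     return [
--         madd(msub(madd(p4, p3), p1), p5),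
--         madd(p0, p1),
--         madd(p2, p3),
--         msub(msub(madd(p0, p4), p2), p6),
--     ]
-- ===== Notes on version B (the rewrite author's own statement) =====
-- stated objective: alternative
-- what changed: Replaces the single fused element-by-element double loop maintaining four growing accumulators with whole-matrix elementwise add/subtract helpers over zipped size-trimmed quadrants, composing each output quadrant as a sequence of matrix operations.
import Mathlib
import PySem

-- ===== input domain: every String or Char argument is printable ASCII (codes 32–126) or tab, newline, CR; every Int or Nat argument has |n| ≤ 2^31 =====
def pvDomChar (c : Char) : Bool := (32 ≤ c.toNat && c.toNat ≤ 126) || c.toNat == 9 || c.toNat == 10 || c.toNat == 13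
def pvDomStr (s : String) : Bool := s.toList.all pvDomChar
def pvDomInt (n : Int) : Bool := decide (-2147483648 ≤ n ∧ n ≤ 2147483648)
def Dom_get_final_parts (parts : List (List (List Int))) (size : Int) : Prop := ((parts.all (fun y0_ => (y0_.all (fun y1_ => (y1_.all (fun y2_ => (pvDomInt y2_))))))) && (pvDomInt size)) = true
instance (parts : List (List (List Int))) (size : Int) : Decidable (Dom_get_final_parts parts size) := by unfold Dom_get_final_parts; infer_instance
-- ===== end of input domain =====

-- B recomposes the result from whole-matrix elementwise add/subtract helpers over
-- size-trimmed quadrants instead of A's fused per-element double loop (objective: alternative).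

-- ===== PORT A =====
-- parts[k][i][j]; total via defaults, exact under Pre_ (all indices in range)
def pvAt (parts : List (List (List Int))) (k i j : Int) : Int :=
  PySem.List.pyGetD (PySem.List.pyGetD (PySem.List.pyGetD parts k []) i []) j 0

def get_final_parts (parts : List (List (List Int))) (size : Int) : List (List (List Int)) :=
  let lines := size
  let columns := size
  let finalParts :=
    (PySem.List.pyRange 0 lines 1).foldl
      (fun (f : List (List Int) × List (List Int) × List (List Int) × List (List Int)) line =>
        let sums :=
          (PySem.List.pyRange 0 columns 1).foldl
            (fun (s : List Int × List Int × List Int × List Int) column =>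
              (s.1 ++ [pvAt parts 4 line column + pvAt parts 3 line column - pvAt parts 1 line column + pvAt parts 5 line column],
               s.2.1 ++ [pvAt parts 0 line column + pvAt parts 1 line column],
               s.2.2.1 ++ [pvAt parts 2 line column + pvAt parts 3 line column],
               s.2.2.2 ++ [pvAt parts 0 line column + pvAt parts 4 line column - pvAt parts 2 line column - pvAt parts 6 line column]))
            ([], [], [], [])
        (f.1 ++ [sums.1], f.2.1 ++ [sums.2.1], f.2.2.1 ++ [sums.2.2.1], f.2.2.2 ++ [sums.2.2.2]))
      ([], [], [], [])
  [finalParts.1, finalParts.2.1, finalParts.2.2.1, finalParts.2.2.2]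

-- ===== PORT B =====
def pvMadd (X Y : List (List Int)) : List (List Int) :=
  (X.zip Y).map (fun r => (r.1.zip r.2).map (fun q => q.1 + q.2))

def pvMsub (X Y : List (List Int)) : List (List Int) :=
  (X.zip Y).map (fun r => (r.1.zip r.2).map (fun q => q.1 - q.2))

-- part(k) = [parts[k][i][:size] for i in range(size)]
def pvPart (parts : List (List (List Int))) (size : Int) (k : Int) : List (List Int) :=
  (PySem.List.pyRange 0 size 1).map (fun i =>
    PySem.List.slice (PySem.List.pyGetD (PySem.List.pyGetD parts k []) i []) none (some size))

def get_final_parts_alt (parts : List (List (List Int))) (size : Int) : List (List (List Int)) :=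
  let p0 := pvPart parts size 0
  let p1 := pvPart parts size 1
  let p2 := pvPart parts size 2
  let p3 := pvPart parts size 3
  let p4 := pvPart parts size 4
  let p5 := pvPart parts size 5
  let p6 := pvPart parts size 6
  [pvMadd (pvMsub (pvMadd p4 p3) p1) p5,
   pvMadd p0 p1,
   pvMadd p2 p3,
   pvMsub (pvMsub (pvMadd p0 p4) p2) p6]

-- ===== PRECONDITION & SPEC =====
-- A raises IndexError iff size ≥ 1 and some needed access parts[k][i][j] (k<7, i<size, j<size) is missing.
def Pre_get_final_parts (parts : List (List (List Int))) (size : Int) : Prop :=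
  size ≤ 0 ∨
    (7 ≤ parts.length ∧
      ∀ p ∈ parts.take 7, size ≤ (p.length : Int) ∧
        ∀ r ∈ p.take size.toNat, size ≤ (r.length : Int))

instance (parts : List (List (List Int))) (size : Int) : Decidable (Pre_get_final_parts parts size) := by
  unfold Pre_get_final_parts; infer_instance

def pvWitness_get_final_parts : List (List (List Int)) × Int :=
  ([[[1, 2], [3, 4]], [[0, 1], [1, 0]], [[2, 2], [2, 2]], [[1, 0], [0, 1]],
    [[5, 6], [7, 8]], [[1, 1], [1, 1]], [[0, 0], [0, 0]]], 2)

def Spec_get_final_parts (parts : List (List (List Int))) (size : Int) (out : List (List (List Int))) : Prop := out = get_final_parts_alt parts size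
instance (parts : List (List (List Int))) (size : Int) (out : List (List (List Int))) : Decidable (Spec_get_final_parts parts size out) := by unfold Spec_get_final_parts; infer_instance

-- ===== CLAIM (what is proved, stated in full; the proofs are below) =====
def Claim_equal_get_final_parts : Prop := ∀ (parts : List (List (List Int))) (size : Int), Dom_get_final_parts parts size → Pre_get_final_parts parts size → Spec_get_final_parts parts size (get_final_parts parts size)

-- ===== LEMMAS AND PROOFS =====

-- A fold that appends one element to each of four accumulators is four maps.
theorem pv_foldl_quad {A B : Type} (L : List A)
    (g1 g2 g3 g4 : A -> B)
    (a b c d : List B) :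
    L.foldl (fun (s : List B × List B × List B × List B) x =>
        (s.1 ++ [g1 x], s.2.1 ++ [g2 x], s.2.2.1 ++ [g3 x], s.2.2.2 ++ [g4 x])) (a, b, c, d)
      = (a ++ L.map g1, b ++ L.map g2, c ++ L.map g3, d ++ L.map g4) := by
  induction L generalizing a b c d with
  | nil => simp
  | cons x xs ih => simp [ih]

theorem pv_madd_maps (n : Nat) (f g : Nat -> List Int) :
    pvMadd ((List.range n).map f) ((List.range n).map g)
      = (List.range n).map (fun i => ((f i).zip (g i)).map (fun q => q.1 + q.2)) := by
  unfold pvMadd; rw [List.zip_map']; simp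

theorem pv_msub_maps (n : Nat) (f g : Nat -> List Int) :
    pvMsub ((List.range n).map f) ((List.range n).map g)
      = (List.range n).map (fun i => ((f i).zip (g i)).map (fun q => q.1 - q.2)) := by
  unfold pvMsub; rw [List.zip_map']; simp

theorem pv_row1 (n : Nat) (op : Int -> Int -> Int) (a b : List Int)
    (ha : n ≤ a.length) (hb : n ≤ b.length) :
    ((a.take n).zip (b.take n)).map (fun q => op q.1 q.2)
      = (List.range n).map (fun j => op (a.getD j 0) (b.getD j 0)) := by
  apply List.ext_getElem
  · simp [ha, hb]
  · intro i h1 h2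
    have hi : i < n := by simpa using h2
    simp [List.getD_eq_getElem?_getD, Nat.lt_of_lt_of_le hi ha, Nat.lt_of_lt_of_le hi hb]

theorem pv_row3 (n : Nat) (op1 op2 op3 : Int -> Int -> Int) (a b c d : List Int)
    (ha : n ≤ a.length) (hb : n ≤ b.length) (hc : n ≤ c.length) (hd : n ≤ d.length) :
    ((((((a.take n).zip (b.take n)).map (fun q => op1 q.1 q.2)).zip (c.take n)).map
        (fun q => op2 q.1 q.2)).zip (d.take n)).map (fun q => op3 q.1 q.2)
      = (List.range n).map (fun j =>
          op3 (op2 (op1 (a.getD j 0) (b.getD j 0)) (c.getD j 0)) (d.getD j 0)) := by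
  apply List.ext_getElem
  · simp [ha, hb, hc, hd]
  · intro i h1 h2
    have hi : i < n := by simpa using h2
    simp [List.getD_eq_getElem?_getD, Nat.lt_of_lt_of_le hi ha, Nat.lt_of_lt_of_le hi hb,
      Nat.lt_of_lt_of_le hi hc, Nat.lt_of_lt_of_le hi hd]

theorem pv_main (parts : List (List (List Int))) (size : Int)
    (hpos : 0 < size) (hlen : 7 ≤ parts.length)
    (hsh : ∀ p ∈ parts.take 7, size ≤ (p.length : Int) ∧
        ∀ r ∈ p.take size.toNat, size ≤ (r.length : Int)) :
    get_final_parts parts size = get_final_parts_alt parts size := by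
  set n : Nat := size.toNat with hn
  have hns : (n : Int) = size := Int.toNat_of_nonneg (by omega)
  -- bounds on the rows actually used
  have hblen : ∀ k : Nat, k < 7 -> ∀ i : Nat, i < n ->
      n ≤ ((parts.getD k []).getD i []).length := by
    intro k hk i hi
    have hkl : k < parts.length := by omega
    have hgk : parts.getD k [] = parts[k] := by
      simp [List.getD_eq_getElem?_getD, hkl]
    have hmem : parts[k] ∈ parts.take 7 := by
      rw [List.mem_take_iff_getElem]
      exact ⟨k, by omega, rfl⟩
    obtain ⟨hrl, hcl⟩ := hsh _ hmem
    have hil : i < parts[k].length := by omega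
    have hgi : (parts.getD k []).getD i [] = parts[k][i] := by
      simp [List.getD_eq_getElem?_getD, hkl, hil]
    have hrmem : parts[k][i] ∈ parts[k].take n := by
      rw [List.mem_take_iff_getElem]
      exact ⟨i, by omega, rfl⟩
    have := hcl _ hrmem
    rw [hgi]; omega
  -- part(k) as a map of take-n rows
  have hpart : ∀ k : Nat,
      pvPart parts size (k : Int) = (List.range n).map (fun i =>
        ((parts.getD k []).getD i []).take n) := by
    intro k
    unfold pvPart
    rw [PySem.List.pyRange_one]
    simp only [Int.sub_zero, ← hns, Int.toNat_natCast, List.map_map]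
    apply List.map_congr_left
    intro i _
    simp [PySem.List.slice_to_natCast]
  have hb4 := hblen 4 (by omega); have hb3 := hblen 3 (by omega)
  have hb1 := hblen 1 (by omega); have hb5 := hblen 5 (by omega)
  have hb0 := hblen 0 (by omega); have hb2 := hblen 2 (by omega)
  have hb6 := hblen 6 (by omega)
  have hp0 : pvPart parts size 0 = (List.range n).map (fun i => ((parts.getD 0 []).getD i []).take n) := by simpa using hpart 0
  have hp1 : pvPart parts size 1 = (List.range n).map (fun i => ((parts.getD 1 []).getD i []).take n) := by simpa using hpart 1
  have hp2 : pvPart parts size 2 = (List.range n).map (fun i => ((parts.getD 2 []).getD i []).take n) := by simpa using hpart 2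
  have hp3 : pvPart parts size 3 = (List.range n).map (fun i => ((parts.getD 3 []).getD i []).take n) := by simpa using hpart 3
  have hp4 : pvPart parts size 4 = (List.range n).map (fun i => ((parts.getD 4 []).getD i []).take n) := by simpa using hpart 4
  have hp5 : pvPart parts size 5 = (List.range n).map (fun i => ((parts.getD 5 []).getD i []).take n) := by simpa using hpart 5
  have hp6 : pvPart parts size 6 = (List.range n).map (fun i => ((parts.getD 6 []).getD i []).take n) := by simpa using hpart 6
  unfold get_final_parts get_final_parts_alt
  dsimp only
  simp only [pv_foldl_quad, List.nil_append]
  simp only [PySem.List.pyRange_one, Int.sub_zero, ← hn, List.map_map]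
  simp only [hp0, hp1, hp2, hp3, hp4, hp5, hp6, pv_madd_maps, pv_msub_maps]
  simp only [List.cons.injEq, and_true]
  refine ⟨?_, ?_, ?_, ?_⟩ <;>
  · apply List.map_congr_left
    intro i hi
    have hin : i < n := List.mem_range.mp hi
    first
      | rw [pv_row3 n _ _ _ _ _ _ _ (hb4 i hin) (hb3 i hin) (hb1 i hin) (hb5 i hin)]
      | rw [pv_row1 n _ _ _ (hb0 i hin) (hb1 i hin)]
      | rw [pv_row1 n _ _ _ (hb2 i hin) (hb3 i hin)]
      | rw [pv_row3 n _ _ _ _ _ _ _ (hb0 i hin) (hb4 i hin) (hb2 i hin) (hb6 i hin)]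
    apply List.map_congr_left
    intro j hj
    simp [pvAt, PySem.List.pyGetD_ofNat', List.getD_eq_getElem?_getD]

-- ===== VERDICT (by name: the statement is the Claim_ definition above) =====
theorem get_final_parts_spec : Claim_equal_get_final_parts := by
  intro parts size _ hpre
  unfold Spec_get_final_parts
  rcases le_or_gt size 0 with hle | hpos
  · have hr : PySem.List.pyRange 0 size 1 = [] := by
      rw [PySem.List.pyRange_one]
      simp
      omega
    unfold get_final_parts get_final_parts_alt
    simp [hr, pvPart, pvMadd, pvMsub]
  · rcases hpre with h | ⟨hlen, hsh⟩
    · omega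
    exact pv_main parts size hpos hlen hsh
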